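-- pv_equiv track=rewrite | github.com/Arkiralor/DockerContainers | src/gui/tui/src/utils/helpers.py | validate_container_name
-- ===== SOURCE A (Python) =====
-- def validate_container_name(name: str) -> bool:
--     """Validate Docker container name format.
--
--     Args:
--         name: Container name to validate
--
--     Returns:
--         True if valid container name format
--     """
--     if not name:
--         return False
--
--     # Docker container names must match: ^[a-zA-Z0-9][a-zA-Z0-9_.-]*$
--     if not name[0].isalnum():
--         return False
--
--     allowed_chars = set(
--         "abcdefghijklmnopqrstuvwxyzABCDEFGHIJKLMNOPQRSTUVWXYZ0123456789_.-"
--     )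
--     return all(c in allowed_chars for c in name)
-- ===== SOURCE B (Python) =====
-- _ALLOWED = "abcdefghijklmnopqrstuvwxyzABCDEFGHIJKLMNOPQRSTUVWXYZ0123456789_.-"
-- _NON_LEADING = "_.-"
--
--
-- def validate_container_name(name: str) -> bool:
--     """Validate Docker container name format.
--
--     A name is valid iff it is non-empty, stripping all allowed characters
--     from both ends leaves nothing, and the first character is not non-leading
--     punctuation (underscore, dot or dash).
--     """
--     return bool(name) and not name.strip(_ALLOWED) and name[0] not in _NON_LEADING
-- ===== Notes on version B (the rewrite author's own statement) =====
-- stated objective: faster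
-- what changed: Replaced the explicit first-char isalnum test plus a handwritten per-character set-membership scan with a single str.strip(allowed) emptiness test (a char-class sieve done by the C library) combined with a check that the first character is not one of the three non-leading punctuation characters.
import Mathlib
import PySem

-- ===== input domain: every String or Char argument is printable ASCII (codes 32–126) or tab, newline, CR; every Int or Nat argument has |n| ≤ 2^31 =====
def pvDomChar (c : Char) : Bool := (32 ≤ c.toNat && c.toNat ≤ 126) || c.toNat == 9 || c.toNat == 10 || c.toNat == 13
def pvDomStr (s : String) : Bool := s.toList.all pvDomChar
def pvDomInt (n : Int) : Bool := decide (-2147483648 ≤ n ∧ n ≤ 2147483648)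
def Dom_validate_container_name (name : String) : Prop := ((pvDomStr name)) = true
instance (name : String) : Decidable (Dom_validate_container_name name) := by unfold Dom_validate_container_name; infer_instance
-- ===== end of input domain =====

-- B replaces A's explicit first-char isalnum test plus per-character set-membership scan
-- by a strip-of-the-allowed-alphabet emptiness test plus a first-char "not in '_.-'" check (simpler decomposition, same cost).


-- ===== PORT A =====
def validate_container_name (name : String) : Bool :=
  if name = "" then false
  else
    match PySem.List.pyGet? name.toList 0 with
    | none => false
    | some c0 =>
      if !(PySem.Chars.isalnum c0) then false
      else
        let allowed : PySem.Set Char :=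
          PySem.Set.ofList
            (String.toList "abcdefghijklmnopqrstuvwxyzABCDEFGHIJKLMNOPQRSTUVWXYZ0123456789_.-")
        name.toList.all (fun c => PySem.Set.contains allowed c)

-- ===== PORT B =====
def pvAllowed : String := "abcdefghijklmnopqrstuvwxyzABCDEFGHIJKLMNOPQRSTUVWXYZ0123456789_.-"
def pvNonLeading : String := "_.-"

def validate_container_name_alt (name : String) : Bool :=
  decide (name ≠ "") &&
  decide (PySem.Chars.stripChars name.toList pvAllowed.toList = []) &&
  (match PySem.List.pyGet? name.toList 0 with
   | none => false
   | some c => !(pvNonLeading.toList.contains c))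

-- ===== PRECONDITION & SPEC =====
def Spec_validate_container_name (name : String) (out : Bool) : Prop := out = validate_container_name_alt name
instance (name : String) (out : Bool) : Decidable (Spec_validate_container_name name out) := by unfold Spec_validate_container_name; infer_instance

-- ===== CLAIM (what is proved, stated in full; the proofs are below) =====
def Claim_equal_validate_container_name : Prop := ∀ (name : String), Dom_validate_container_name name → Spec_validate_container_name name (validate_container_name name)

-- ===== LEMMAS AND PROOFS =====

-- stripping the allowed alphabet leaves nothing iff every character is allowed
lemma strip_empty_iff (s chars : List Char) :
    (PySem.Chars.stripChars s chars = []) ↔ ∀ x ∈ s, chars.contains x = true := by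
  simp only [PySem.Chars.stripChars, List.reverse_eq_nil_iff, List.dropWhile_eq_nil_iff,
    List.mem_reverse]
  constructor
  · intro h x hx
    rw [← List.takeWhile_append_dropWhile (p := fun c => chars.contains c) (l := s)] at hx
    rcases List.mem_append.mp hx with h1 | h2
    · exact List.mem_takeWhile_imp h1
    · exact h x h2
  · intro h x hx
    exact h x ((List.dropWhile_sublist _).subset hx)

-- on the ASCII range, isalnum coincides with allowed-and-not-punctuation, and the
-- Python set of allowed characters contains exactly what the allowed string contains
set_option maxRecDepth 10000 in
lemma char_table (c : Char) (hc : c.toNat ≤ 126) :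
    PySem.Chars.isalnum c
        = (pvAllowed.toList.contains c && !(pvNonLeading.toList.contains c))
      ∧ PySem.Set.contains (PySem.Set.ofList (String.toList
          "abcdefghijklmnopqrstuvwxyzABCDEFGHIJKLMNOPQRSTUVWXYZ0123456789_.-")) c
        = pvAllowed.toList.contains c := by
  have h : ((List.range 127).all fun n =>
      (PySem.Chars.isalnum (Char.ofNat n)
        == (pvAllowed.toList.contains (Char.ofNat n)
            && !(pvNonLeading.toList.contains (Char.ofNat n))))
      && (PySem.Set.contains (PySem.Set.ofList (String.toList
            "abcdefghijklmnopqrstuvwxyzABCDEFGHIJKLMNOPQRSTUVWXYZ0123456789_.-"))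
            (Char.ofNat n)
          == pvAllowed.toList.contains (Char.ofNat n))) = true := by decide
  have h2 := List.all_eq_true.mp h c.toNat (List.mem_range.mpr (by omega))
  rw [Char.ofNat_toNat, Bool.and_eq_true] at h2
  exact ⟨eq_of_beq h2.1, eq_of_beq h2.2⟩

lemma dom_char_le (c : Char) (h : pvDomChar c = true) : c.toNat ≤ 126 := by
  simp only [pvDomChar, Bool.or_eq_true, Bool.and_eq_true, decide_eq_true_eq, beq_iff_eq] at h
  omega

-- ===== VERDICT (by name: the statement is the Claim_ definition above) =====
theorem validate_container_name_spec : Claim_equal_validate_container_name := by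
  intro name hdom
  unfold Spec_validate_container_name
  by_cases hname : name = ""
  · subst hname; decide
  · have hlist : name.toList ≠ [] := fun h => hname (String.toList_eq_nil_iff.mp h)
    obtain ⟨c, cs, hcons⟩ := List.exists_cons_of_ne_nil hlist
    have hdomc : ∀ x ∈ name.toList, pvDomChar x = true := by
      simpa [Dom_validate_container_name, pvDomStr, List.all_eq_true] using hdom
    simp only [validate_container_name, validate_container_name_alt, hcons, hname,
      if_false, PySem.List.pyGet?_zero_cons, ne_eq, not_false_iff, decide_true,
      Bool.true_and]
    have hstrip : decide (PySem.Chars.stripChars (c :: cs) pvAllowed.toList = [])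
        = (c :: cs).all (fun x => pvAllowed.toList.contains x) := by
      apply Bool.eq_iff_iff.mpr
      simp only [decide_eq_true_eq, List.all_eq_true, strip_empty_iff]
    rw [hstrip]
    have hall : (c :: cs).all (fun x => PySem.Set.contains
          (PySem.Set.ofList (String.toList
            "abcdefghijklmnopqrstuvwxyzABCDEFGHIJKLMNOPQRSTUVWXYZ0123456789_.-")) x)
        = (c :: cs).all (fun x => pvAllowed.toList.contains x) := by
      apply Bool.eq_iff_iff.mpr
      simp only [List.all_eq_true]
      constructor
      · intro h x hx
        rw [← (char_table x (dom_char_le x (hdomc x (hcons ▸ hx)))).2]; exact h x hx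
      · intro h x hx
        rw [(char_table x (dom_char_le x (hdomc x (hcons ▸ hx)))).2]; exact h x hx
    rw [hall]
    have hcle : c.toNat ≤ 126 := dom_char_le c (hdomc c (by rw [hcons]; exact List.mem_cons_self))
    rw [(char_table c hcle).1]
    cases hA : pvAllowed.toList.contains c <;>
      cases hE : pvNonLeading.toList.contains c <;>
        simp only [List.all_cons, hA, hE, Bool.false_and, Bool.and_false,
          Bool.true_and, Bool.and_true, Bool.not_false, Bool.not_true] <;> simp
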